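-- pv_equiv track=rewrite | github.com/ckonicki-umich/AAMAS26 | te_psro_experiments_with_gengoof/plot_pbe_vs_ne_regret.py | splice_regret_threshold
-- ===== SOURCE A (Python) =====
-- def splice_regret_threshold(THRESH, true_regret_over_time):
-- 	regret_copy = []
-- 	for i in range(len(true_regret_over_time)):
-- 		r = true_regret_over_time[i]
-- 		regret_copy.append(r)
-- 		if r <= THRESH:
-- 			return regret_copy
--
-- 	return regret_copy
-- ===== SOURCE B (Python) =====
-- def splice_regret_threshold(THRESH, true_regret_over_time):
-- 	idx = next((i for i, r in enumerate(true_regret_over_time) if r <= THRESH), None)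
-- 	if idx is None:
-- 		return true_regret_over_time[:]
-- 	return true_regret_over_time[:idx + 1]
-- ===== Notes on version B (the rewrite author's own statement) =====
-- stated objective: simpler
-- what changed: Replaces the append-in-a-loop-with-early-return accumulator by locating the cut point (first index with value <= THRESH) and slicing the prefix, maintaining no accumulator.
import Mathlib
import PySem

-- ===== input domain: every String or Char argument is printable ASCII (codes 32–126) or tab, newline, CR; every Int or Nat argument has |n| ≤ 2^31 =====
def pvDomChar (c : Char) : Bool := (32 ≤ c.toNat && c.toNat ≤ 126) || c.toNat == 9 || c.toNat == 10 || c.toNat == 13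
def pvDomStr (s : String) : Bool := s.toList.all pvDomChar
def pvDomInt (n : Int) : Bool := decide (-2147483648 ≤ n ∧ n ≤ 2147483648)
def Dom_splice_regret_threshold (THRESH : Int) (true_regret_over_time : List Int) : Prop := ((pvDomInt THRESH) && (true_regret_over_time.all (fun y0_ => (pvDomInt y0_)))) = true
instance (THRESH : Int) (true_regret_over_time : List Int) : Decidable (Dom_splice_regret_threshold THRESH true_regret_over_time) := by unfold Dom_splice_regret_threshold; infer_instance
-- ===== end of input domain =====

-- B replaces A's append-accumulator loop with early return by finding the first index
-- with value ≤ THRESH and slicing the prefix up to it (objective: simpler).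

-- ===== PORT A =====
-- A's loop over range(len(...)) with accumulator regret_copy; early return when r ≤ THRESH.
def spliceLoopA (THRESH : Int) : List Int → List Int → List Int
  | [], acc => acc
  | r :: rest, acc =>
      let acc' := acc ++ [r]
      if r ≤ THRESH then acc' else spliceLoopA THRESH rest acc'

def splice_regret_threshold (THRESH : Int) (true_regret_over_time : List Int) : List Int :=
  spliceLoopA THRESH true_regret_over_time []

-- ===== PORT B =====
def splice_regret_threshold_alt (THRESH : Int) (true_regret_over_time : List Int) : List Int :=
  match true_regret_over_time.findIdx? (fun r => r ≤ THRESH) with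
  | some idx => true_regret_over_time.take (idx + 1)
  | none => true_regret_over_time

-- ===== PRECONDITION & SPEC =====
def Spec_splice_regret_threshold (THRESH : Int) (true_regret_over_time : List Int) (out : List Int) : Prop := out = splice_regret_threshold_alt THRESH true_regret_over_time
instance (THRESH : Int) (true_regret_over_time : List Int) (out : List Int) : Decidable (Spec_splice_regret_threshold THRESH true_regret_over_time out) := by unfold Spec_splice_regret_threshold; infer_instance

-- ===== CLAIM (what is proved, stated in full; the proofs are below) =====
def Claim_equal_splice_regret_threshold : Prop := ∀ (THRESH : Int) (true_regret_over_time : List Int), Dom_splice_regret_threshold THRESH true_regret_over_time → Spec_splice_regret_threshold THRESH true_regret_over_time (splice_regret_threshold THRESH true_regret_over_time)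

-- ===== LEMMAS AND PROOFS =====
theorem spliceLoopA_eq_alt (THRESH : Int) :
    ∀ (xs acc : List Int), spliceLoopA THRESH xs acc = acc ++ splice_regret_threshold_alt THRESH xs := by
  intro xs
  induction xs with
  | nil => intro acc; simp [spliceLoopA, splice_regret_threshold_alt, List.findIdx?, List.findIdx?.go]
  | cons r rest ih =>
      intro acc
      by_cases h : r ≤ THRESH
      · simp [spliceLoopA, h, splice_regret_threshold_alt, List.findIdx?_cons]
      · simp only [spliceLoopA, h, if_false, ih]
        have : splice_regret_threshold_alt THRESH (r :: rest)
            = r :: splice_regret_threshold_alt THRESH rest := by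
          simp only [splice_regret_threshold_alt, List.findIdx?_cons, decide_eq_true_eq, h,
            if_false]
          cases hf : List.findIdx? (fun r => decide (r ≤ THRESH)) rest with
          | none => simp
          | some i => simp [List.take_succ_cons]
        simp [this]

-- ===== VERDICT (by name: the statement is the Claim_ definition above) =====
theorem splice_regret_threshold_spec : Claim_equal_splice_regret_threshold := by
  intro THRESH xs _
  unfold Spec_splice_regret_threshold splice_regret_threshold
  simpa using spliceLoopA_eq_alt THRESH xs []
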